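-- pv_equiv track=rewrite | github.com/LoganFriedrich/MouseReach | training/analyze_v52_errors.py | match_reaches
-- ===== SOURCE A (Python) =====
-- def match_reaches(gt_reaches, algo_reaches, max_dist=30):
--     candidates = []
--     for gi, gr in enumerate(gt_reaches):
--         for ai, ar in enumerate(algo_reaches):
--             dist = abs(gr['start_frame'] - ar.get('start_frame', 0))
--             if dist <= max_dist:
--                 candidates.append((dist, gi, ai))
--     candidates.sort()
--     gt_used, algo_used = set(), set()
--     matches = []
--     for dist, gi, ai in candidates:
--         if gi not in gt_used and ai not in algo_used:
--             gt_used.add(gi)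
--             algo_used.add(ai)
--             matches.append((gi, ai, dist))
--     return matches, set(range(len(gt_reaches))) - gt_used, set(range(len(algo_reaches))) - algo_used
-- ===== SOURCE B (Python) =====
-- def match_reaches(gt_reaches, algo_reaches, max_dist=30):
--     gt_used, algo_used = set(), set()
--     matches = []
--     while True:
--         best = None
--         for gi, gr in enumerate(gt_reaches):
--             if gi in gt_used:
--                 continue
--             for ai, ar in enumerate(algo_reaches):
--                 if ai in algo_used:
--                     continue
--                 dist = abs(gr['start_frame'] - ar.get('start_frame', 0))
--                 if dist <= max_dist and (best is None or (dist, gi, ai) < best):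
--                     best = (dist, gi, ai)
--         if best is None:
--             break
--         dist, gi, ai = best
--         gt_used.add(gi)
--         algo_used.add(ai)
--         matches.append((gi, ai, dist))
--     return (matches,
--             {i for i in range(len(gt_reaches)) if i not in gt_used},
--             {i for i in range(len(algo_reaches)) if i not in algo_used})
-- ===== Notes on version B (the rewrite author's own statement) =====
-- stated objective: alternative
-- what changed: A builds the full candidate list, sorts it by (dist, gi, ai) and scans it greedily; B never builds or sorts a candidate list: it repeatedly scans the grid for the globally minimal admissible (dist, gi, ai) pair, marking endpoints used until none remains.
import Mathlib
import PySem

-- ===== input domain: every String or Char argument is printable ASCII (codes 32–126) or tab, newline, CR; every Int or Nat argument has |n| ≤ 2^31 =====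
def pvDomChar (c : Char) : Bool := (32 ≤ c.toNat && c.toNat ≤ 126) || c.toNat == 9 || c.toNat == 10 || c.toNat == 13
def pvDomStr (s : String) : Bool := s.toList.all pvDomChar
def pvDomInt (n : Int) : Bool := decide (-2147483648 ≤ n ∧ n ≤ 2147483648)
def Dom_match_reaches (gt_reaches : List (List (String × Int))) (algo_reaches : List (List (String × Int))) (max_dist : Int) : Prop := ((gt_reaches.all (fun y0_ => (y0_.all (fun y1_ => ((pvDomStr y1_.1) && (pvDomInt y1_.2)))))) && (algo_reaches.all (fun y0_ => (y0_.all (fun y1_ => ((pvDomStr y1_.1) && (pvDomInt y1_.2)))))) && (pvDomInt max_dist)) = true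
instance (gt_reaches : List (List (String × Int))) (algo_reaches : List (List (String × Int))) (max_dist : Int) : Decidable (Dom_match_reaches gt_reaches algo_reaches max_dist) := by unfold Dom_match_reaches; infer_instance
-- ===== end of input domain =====

-- B replaces A's build-all-candidates-then-sort greedy by a repeated-global-minimum greedy
-- (no candidate list, no sort): objective 'alternative', same return value.

-- gr['start_frame'] / ar.get('start_frame', 0): first-match association-list lookup, default 0
-- (exact under Pre_, which excludes the inputs where Python's gr['start_frame'] raises KeyError).
def pvSF (d : List (String × Int)) : Int := PySem.Dict.getD (PySem.Dict.mk d) "start_frame" 0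

-- Python tuple-lexicographic order on the (dist, gi, ai) triples, as a LinearOrder key
def pvKey (c : Int × Int × Int) : Lex (Int × Lex (Int × Int)) := toLex (c.1, toLex (c.2.1, c.2.2))

-- Python '(d,g,a) < (d',g',a')' (tuple lexicographic comparison), as a Bool
def pvTripLt (x y : Int × Int × Int) : Bool :=
  x.1 < y.1 || (x.1 == y.1 && (x.2.1 < y.2.1 || (x.2.1 == y.2.1 && x.2.2 < y.2.2)))

-- ===== PORT A =====
def pvA_cands (gt_reaches : List (List (String × Int))) (algo_reaches : List (List (String × Int))) (max_dist : Int) : List (Int × Int × Int) :=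
  (PySem.List.enumerate gt_reaches).foldl (fun acc p =>
    (PySem.List.enumerate algo_reaches).foldl (fun acc2 q =>
      let dist := |pvSF p.2 - pvSF q.2|
      if dist ≤ max_dist then acc2 ++ [(dist, p.1, q.1)] else acc2) acc) []

def pvA_step (st : List (Int × Int × Int) × PySem.Set Int × PySem.Set Int) (c : Int × Int × Int) :
    List (Int × Int × Int) × PySem.Set Int × PySem.Set Int :=
  if !(PySem.Set.contains st.2.1 c.2.1) && !(PySem.Set.contains st.2.2 c.2.2) then
    (st.1 ++ [(c.2.1, c.2.2, c.1)], PySem.Set.add st.2.1 c.2.1, PySem.Set.add st.2.2 c.2.2)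
  else st

def match_reaches (gt_reaches : List (List (String × Int))) (algo_reaches : List (List (String × Int))) (max_dist : Int) : (List (Int × Int × Int)) × List Int × List Int :=
  let sortedC := PySem.List.sorted (pvA_cands gt_reaches algo_reaches max_dist) pvKey false
  let st := sortedC.foldl pvA_step ([], PySem.Set.empty, PySem.Set.empty)
  (st.1,
   PySem.Set.diff (PySem.Set.ofList (PySem.List.pyRange 0 gt_reaches.length 1)) st.2.1,
   PySem.Set.diff (PySem.Set.ofList (PySem.List.pyRange 0 algo_reaches.length 1)) st.2.2)

-- ===== PORT B =====
-- one scan of the grid: the admissible (dist, gi, ai) minimal under tuple order, if any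
def pvB_best (gt_reaches : List (List (String × Int))) (algo_reaches : List (List (String × Int))) (max_dist : Int) (gu au : PySem.Set Int) : Option (Int × Int × Int) :=
  (PySem.List.enumerate gt_reaches).foldl (fun best p =>
    if PySem.Set.contains gu p.1 then best else
    (PySem.List.enumerate algo_reaches).foldl (fun best q =>
      if PySem.Set.contains au q.1 then best else
      let dist := |pvSF p.2 - pvSF q.2|
      if dist ≤ max_dist && (match best with | none => true | some b => pvTripLt (dist, p.1, q.1) b)
      then some (dist, p.1, q.1) else best) best) none

-- the 'while True' loop; each pass matches one fresh gt index, so gt_reaches.length passes suffice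
def pvB_loop (gt_reaches : List (List (String × Int))) (algo_reaches : List (List (String × Int))) (max_dist : Int) :
    Nat → List (Int × Int × Int) × PySem.Set Int × PySem.Set Int → List (Int × Int × Int) × PySem.Set Int × PySem.Set Int
  | 0, st => st
  | fuel + 1, st =>
    match pvB_best gt_reaches algo_reaches max_dist st.2.1 st.2.2 with
    | none => st
    | some c => pvB_loop gt_reaches algo_reaches max_dist fuel
        (st.1 ++ [(c.2.1, c.2.2, c.1)], PySem.Set.add st.2.1 c.2.1, PySem.Set.add st.2.2 c.2.2)

def match_reaches_alt (gt_reaches : List (List (String × Int))) (algo_reaches : List (List (String × Int))) (max_dist : Int) : (List (Int × Int × Int)) × List Int × List Int :=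
  let st := pvB_loop gt_reaches algo_reaches max_dist gt_reaches.length ([], PySem.Set.empty, PySem.Set.empty)
  (st.1,
   PySem.Set.ofList ((PySem.List.pyRange 0 gt_reaches.length 1).filter (fun i => !(PySem.Set.contains st.2.1 i))),
   PySem.Set.ofList ((PySem.List.pyRange 0 algo_reaches.length 1).filter (fun i => !(PySem.Set.contains st.2.2 i))))

-- ===== PRECONDITION & SPEC =====
-- Pre_ excludes exactly the inputs where Python A raises KeyError: algo_reaches nonempty and
-- some gt dict lacking the key 'start_frame' (with algo_reaches empty the subscript never runs).
def Pre_match_reaches (gt_reaches : List (List (String × Int))) (algo_reaches : List (List (String × Int))) (max_dist : Int) : Prop :=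
  algo_reaches = [] ∨ ∀ gr ∈ gt_reaches, (PySem.Dict.get? (PySem.Dict.mk gr) "start_frame").isSome = true
instance (gt_reaches : List (List (String × Int))) (algo_reaches : List (List (String × Int))) (max_dist : Int) : Decidable (Pre_match_reaches gt_reaches algo_reaches max_dist) := by unfold Pre_match_reaches; infer_instance

def pvWitness_match_reaches : (List (List (String × Int))) × (List (List (String × Int))) × Int :=
  ([[("start_frame", 5)], [("start_frame", 40)]], [[("start_frame", 7)], []], 30)

def Spec_match_reaches (gt_reaches : List (List (String × Int))) (algo_reaches : List (List (String × Int))) (max_dist : Int) (out : (List (Int × Int × Int)) × List Int × List Int) : Prop := out = match_reaches_alt gt_reaches algo_reaches max_dist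
instance (gt_reaches : List (List (String × Int))) (algo_reaches : List (List (String × Int))) (max_dist : Int) (out : (List (Int × Int × Int)) × List Int × List Int) : Decidable (Spec_match_reaches gt_reaches algo_reaches max_dist out) := by unfold Spec_match_reaches; infer_instance

-- ===== CLAIM (what is proved, stated in full; the proofs are below) =====
def Claim_equal_match_reaches : Prop := ∀ (gt_reaches : List (List (String × Int))) (algo_reaches : List (List (String × Int))) (max_dist : Int), Dom_match_reaches gt_reaches algo_reaches max_dist → Pre_match_reaches gt_reaches algo_reaches max_dist → Spec_match_reaches gt_reaches algo_reaches max_dist (match_reaches gt_reaches algo_reaches max_dist)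

-- ===== LEMMAS AND PROOFS =====

-- the full candidate grid, in generation order
def pvG (gt algo : List (List (String × Int))) : List (Int × Int × Int) :=
  (PySem.List.enumerate gt).flatMap (fun p =>
    (PySem.List.enumerate algo).map (fun q => (|pvSF p.2 - pvSF q.2|, p.1, q.1)))

def pvC (gt algo : List (List (String × Int))) (m : Int) : List (Int × Int × Int) :=
  (pvG gt algo).filter (fun c => decide (c.1 ≤ m))

def pvSo (gt algo : List (List (String × Int))) (m : Int) : List (Int × Int × Int) :=
  PySem.List.sorted (pvC gt algo m) pvKey false

def pvAdm (gu au : PySem.Set Int) (c : Int × Int × Int) : Bool :=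
  !(PySem.Set.contains gu c.2.1) && !(PySem.Set.contains au c.2.2)

def pvOptStep (b : Option (Int × Int × Int)) (c : Int × Int × Int) : Option (Int × Int × Int) :=
  if (match b with | none => true | some x => pvTripLt c x) then some c else b

def pvFree (gt : List (List (String × Int))) (gu : PySem.Set Int) : Nat :=
  ((PySem.List.pyRange 0 gt.length 1).filter (fun i => !(PySem.Set.contains gu i))).length

theorem pvKey_lt_iff (x y : Int × Int × Int) :
    pvKey x < pvKey y ↔ (x.1 < y.1 ∨ (x.1 = y.1 ∧ (x.2.1 < y.2.1 ∨ (x.2.1 = y.2.1 ∧ x.2.2 < y.2.2)))) := by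
  simp [pvKey, Prod.Lex.lt_iff]


theorem pvTripLt_iff (x y : Int × Int × Int) : pvTripLt x y = true ↔ pvKey x < pvKey y := by
  rw [pvKey_lt_iff]
  simp [pvTripLt]


theorem pvKey_inj : Function.Injective pvKey := by
  intro a b h
  simp only [pvKey, toLex_inj, Prod.ext_iff] at h
  exact Prod.ext h.1 (Prod.ext h.2.1 h.2.2)


theorem pv_candA_eq (gt algo : List (List (String × Int))) (m : Int) :
    pvA_cands gt algo m = pvC gt algo m := by
  unfold pvA_cands pvC pvG
  simp only [PySem.List.foldl_append_ite]
  rw [PySem.List.foldl_append_eq_flatMap]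
  rw [List.filter_flatMap]
  simp only [List.filter_map]
  rfl


theorem pv_G_pairwise (gt algo : List (List (String × Int))) :
    (pvG gt algo).Pairwise (fun a b => a.2 ≠ b.2) := by
  unfold pvG
  rw [List.pairwise_flatMap]
  constructor
  · intro p _
    rw [List.pairwise_map]
    refine (PySem.List.pairwise_lt_enumerate algo 0).imp ?_
    intro q1 q2 hlt heq
    simp only [Prod.ext_iff] at heq
    omega
  · refine (PySem.List.pairwise_lt_enumerate gt 0).imp ?_
    intro p1 p2 hlt x hx y hy heq
    obtain ⟨q1, -, rfl⟩ := List.mem_map.mp hx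
    obtain ⟨q2, -, rfl⟩ := List.mem_map.mp hy
    simp only [Prod.ext_iff] at heq
    omega


theorem pv_C_keys_nodup (gt algo : List (List (String × Int))) (m : Int) :
    ((pvC gt algo m).map pvKey).Nodup := by
  have h1 := (pv_G_pairwise gt algo).filter (fun c => decide (c.1 ≤ m))
  have h2 : (pvC gt algo m).Pairwise (fun a b => pvKey a ≠ pvKey b) :=
    h1.imp (fun hne heq => hne (congrArg (fun z => z.2) (pvKey_inj heq)))
  exact List.pairwise_map.mpr h2


theorem pv_So_strict (gt algo : List (List (String × Int))) (m : Int) :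
    (pvSo gt algo m).Pairwise (fun a b => pvKey a < pvKey b) := by
  have hle := PySem.List.sorted_pairwise (pvC gt algo m) pvKey
  have hperm : (pvSo gt algo m).Perm (pvC gt algo m) := PySem.List.sorted_perm _ _ _
  have hnd : ((pvSo gt algo m).map pvKey).Nodup :=
    ((hperm.map pvKey).nodup_iff).mpr (pv_C_keys_nodup gt algo m)
  have hne : (pvSo gt algo m).Pairwise (fun a b => pvKey a ≠ pvKey b) := List.pairwise_map.mp hnd
  exact (hle.and hne).imp (fun h => lt_of_le_of_ne h.1 h.2)


theorem pv_mem_C_gi (gt algo : List (List (String × Int))) (m : Int) (c : Int × Int × Int)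
    (h : c ∈ pvC gt algo m) : 0 ≤ c.2.1 ∧ c.2.1 < (gt.length : Int) := by
  have hG : c ∈ pvG gt algo := List.mem_of_mem_filter h
  unfold pvG at hG
  obtain ⟨p, hp, hc⟩ := List.mem_flatMap.mp hG
  obtain ⟨q, -, rfl⟩ := List.mem_map.mp hc
  obtain ⟨k, hk, rfl⟩ := (PySem.List.mem_enumerate_iff gt 0 p).mp hp
  simp only
  omega


-- fold-minimum invariants
theorem pv_foldMin_none (l : List (Int × Int × Int)) (b : Option (Int × Int × Int)) :
    l.foldl pvOptStep b = none ↔ b = none ∧ l = [] := by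
  induction l generalizing b with
  | nil => simp
  | cons x t ih =>
    rw [List.foldl_cons, ih]
    constructor
    · rintro ⟨h1, -⟩
      exfalso
      cases b <;> unfold pvOptStep at h1 <;> simp at h1 <;> split at h1 <;> simp_all
    · rintro ⟨-, h⟩
      exact absurd h (by simp)


theorem pv_foldMin_mem (l : List (Int × Int × Int)) (b : Option (Int × Int × Int)) (c : Int × Int × Int)
    (h : l.foldl pvOptStep b = some c) : c ∈ l ∨ b = some c := by
  induction l generalizing b with
  | nil => simp at h; exact Or.inr (by rw [h])
  | cons x t ih =>
    rw [List.foldl_cons] at h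
    rcases ih _ h with h1 | h1
    · exact Or.inl (List.mem_cons_of_mem _ h1)
    · unfold pvOptStep at h1
      cases b with
      | none =>
        simp at h1
        exact Or.inl (by rw [← h1]; exact List.mem_cons_self)
      | some z =>
        by_cases hlt : pvTripLt x z = true
        · simp only [hlt, if_true] at h1
          exact Or.inl (by rw [← Option.some.inj h1]; exact List.mem_cons_self)
        · simp only [hlt, if_false, Bool.false_eq_true] at h1
          exact Or.inr h1


theorem pv_foldMin_min (l : List (Int × Int × Int)) (b : Option (Int × Int × Int)) (c : Int × Int × Int)
    (h : l.foldl pvOptStep b = some c) :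
    (∀ y ∈ l, ¬ pvKey y < pvKey c) ∧ (∀ x, b = some x → ¬ pvKey x < pvKey c) := by
  induction l generalizing b with
  | nil =>
    simp at h
    refine ⟨by simp, ?_⟩
    intro x hx
    rw [hx] at h
    cases Option.some.injEq _ _ |>.mp h
    exact lt_irrefl _
  | cons x t ih =>
    rw [List.foldl_cons] at h
    obtain ⟨ihy, ihb⟩ := ih _ h
    have hx : ¬ pvKey x < pvKey c := by
      cases b with
      | none => exact ihb x (by unfold pvOptStep; simp)
      | some z =>
        by_cases hlt : pvTripLt x z = true
        · exact ihb x (by unfold pvOptStep; simp [hlt])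
        · have h1 : pvKey z ≤ pvKey x := not_lt.mp (fun hc => hlt ((pvTripLt_iff x z).mpr hc))
          have h2 : ¬ pvKey z < pvKey c := ihb z (by unfold pvOptStep; simp [hlt])
          exact fun hltc => h2 (lt_of_le_of_lt h1 hltc)
    refine ⟨?_, ?_⟩
    · intro y hy
      rcases List.mem_cons.mp hy with rfl | hy'
      · exact hx
      · exact ihy y hy'
    · intro z hz
      subst hz
      by_cases hlt : pvTripLt x z = true
      · have hxc : pvKey c ≤ pvKey x := not_lt.mp hx
        have hxz : pvKey x < pvKey z := (pvTripLt_iff _ _).mp hlt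
        exact fun hc => absurd (lt_trans hc (lt_of_le_of_lt hxc hxz)) (lt_irrefl _)
      · exact ihb z (by unfold pvOptStep; simp [hlt])


-- pvB_best as a single fold over the admissible candidates
theorem pv_best_eq_foldMin (gt algo : List (List (String × Int))) (m : Int) (gu au : PySem.Set Int) :
    pvB_best gt algo m gu au = ((pvC gt algo m).filter (pvAdm gu au)).foldl pvOptStep none := by
  unfold pvB_best pvC pvG
  rw [List.filter_filter, List.filter_flatMap, List.foldl_flatMap]
  refine PySem.List.foldl_congr_mem _ _ _ _ ?_
  intro b p hp
  by_cases hgu : PySem.Set.contains gu p.1 = true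
  · rw [if_pos hgu, List.filter_map, List.foldl_map, List.foldl_filter]
    symm
    refine Eq.trans (PySem.List.foldl_congr_mem _ _ (fun acc q => acc) _ ?_) (PySem.List.foldl_ignore _ _)
    intro b2 q hq
    exact if_neg (fun hc => by
      simp [pvAdm] at hc
      exact hc.1.1 ((PySem.Set.contains_iff _ _).mp hgu))
  · rw [if_neg hgu, List.filter_map, List.foldl_map, List.foldl_filter]
    refine PySem.List.foldl_congr_mem _ _ _ _ ?_
    intro b2 q hq
    simp only [Function.comp_apply]
    by_cases hau : PySem.Set.contains au q.1 = true
    · rw [if_pos hau, if_neg (fun hc => by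
        simp [pvAdm] at hc
        exact hc.1.2 ((PySem.Set.contains_iff _ _).mp hau))]
    · rw [if_neg hau]
      have h1 : pvAdm gu au (|pvSF p.2 - pvSF q.2|, p.1, q.1) = true := by
        unfold pvAdm
        rw [Bool.eq_false_iff.mpr hgu, Bool.eq_false_iff.mpr hau]
        rfl
      by_cases hd : |pvSF p.2 - pvSF q.2| ≤ m
      · simp only [h1, decide_eq_true hd, Bool.true_and, if_true, pvOptStep]
      · simp only [h1, decide_eq_false hd, Bool.false_and, Bool.and_false]
        rfl


-- pvB_best finds the head of the admissible part of the sorted candidate list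
theorem pv_best_char (gt algo : List (List (String × Int))) (m : Int) (gu au : PySem.Set Int) :
    pvB_best gt algo m gu au = ((pvSo gt algo m).filter (pvAdm gu au)).head? := by
  rw [pv_best_eq_foldMin]
  have hperm : ((pvSo gt algo m).filter (pvAdm gu au)).Perm ((pvC gt algo m).filter (pvAdm gu au)) :=
    (PySem.List.sorted_perm _ _ _).filter _
  cases hS : (pvSo gt algo m).filter (pvAdm gu au) with
  | nil =>
    have hl : (pvC gt algo m).filter (pvAdm gu au) = [] := by
      rw [hS] at hperm
      exact hperm.symm.eq_nil
    rw [hl]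
    rfl
  | cons hd tl =>
    rw [hS] at hperm
    have hne : (pvC gt algo m).filter (pvAdm gu au) ≠ [] := by
      intro hc
      rw [hc] at hperm
      exact absurd hperm.eq_nil (by simp)
    cases hfold : ((pvC gt algo m).filter (pvAdm gu au)).foldl pvOptStep none with
    | none =>
      exact absurd ((pv_foldMin_none _ _).mp hfold).2 hne
    | some c =>
      have hmem : c ∈ (pvC gt algo m).filter (pvAdm gu au) :=
        (pv_foldMin_mem _ _ _ hfold).resolve_right (by simp)
      have hmin := (pv_foldMin_min _ _ _ hfold).1
      have hmemS : c ∈ hd :: tl := hperm.symm.mem_iff.mp hmem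
      have hhd : hd ∈ (pvC gt algo m).filter (pvAdm gu au) := hperm.mem_iff.mp List.mem_cons_self
      have hstrict : (hd :: tl).Pairwise (fun a b => pvKey a < pvKey b) := by
        rw [← hS]
        exact (pv_So_strict gt algo m).filter _
      rcases List.mem_cons.mp hmemS with rfl | hc'
      · rfl
      · exact absurd (List.rel_of_pairwise_cons hstrict hc') (hmin hd hhd)


theorem pv_contains_add (s : PySem.Set Int) (v y : Int) :
    PySem.Set.contains (PySem.Set.add s v) y = (PySem.Set.contains s y || y == v) := by
  by_cases hv : y = v
  · subst hv
    have : y ∈ PySem.Set.add s y := (PySem.Set.mem_add s y y).mpr (Or.inr rfl)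
    rw [(PySem.Set.contains_iff _ _).mpr this]
    simp
  · by_cases hm : y ∈ s
    · have : y ∈ PySem.Set.add s v := (PySem.Set.mem_add s v y).mpr (Or.inl hm)
      rw [(PySem.Set.contains_iff _ _).mpr this, (PySem.Set.contains_iff _ _).mpr hm]
      simp
    · have h1 : y ∉ PySem.Set.add s v := fun hc => (((PySem.Set.mem_add s v y).mp hc).elim hm hv)
      have h2 : PySem.Set.contains (PySem.Set.add s v) y = false := by
        cases hc : PySem.Set.contains (PySem.Set.add s v) y
        · rfl
        · exact absurd ((PySem.Set.contains_iff _ _).mp hc) h1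
      have h3 : PySem.Set.contains s y = false := by
        cases hc : PySem.Set.contains s y
        · rfl
        · exact absurd ((PySem.Set.contains_iff _ _).mp hc) hm
      rw [h2, h3]
      simp [hv]


theorem pv_free_dec (gt : List (List (String × Int))) (gu : PySem.Set Int) (gi : Int)
    (h0 : 0 ≤ gi) (h1 : gi < (gt.length : Int)) (h2 : PySem.Set.contains gu gi = false) :
    pvFree gt (PySem.Set.add gu gi) + 1 = pvFree gt gu := by
  unfold pvFree
  have hcongr : ∀ (r : List Int), r.filter (fun i => !(PySem.Set.contains (PySem.Set.add gu gi) i))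
      = (r.filter (fun i => !(PySem.Set.contains gu i))).filter (fun i => i != gi) := by
    intro r
    rw [List.filter_filter]
    apply List.filter_congr
    intro x _
    rw [pv_contains_add]
    cases hc : PySem.Set.contains gu x <;> cases hx : x == gi <;> simp_all [bne]
  rw [hcongr]
  set t := (PySem.List.pyRange 0 (gt.length : Int) 1).filter (fun i => !(PySem.Set.contains gu i)) with ht
  have hnd : t.Nodup := (PySem.List.nodup_pyRange_one 0 (gt.length : Int)).filter _
  have hmem : gi ∈ t := by
    rw [ht]
    exact List.mem_filter.mpr ⟨PySem.List.mem_pyRange_one.mpr ⟨h0, h1⟩, by rw [h2]; rfl⟩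
  have he : t.filter (fun i => i != gi) = t.erase gi := (hnd.erase_eq_filter gi).symm
  rw [he, List.length_erase_of_mem hmem]
  have : 0 < t.length := List.length_pos_of_mem hmem
  omega


-- MAIN: the sorted-scan greedy equals the repeated-global-minimum greedy
theorem pv_main (gt algo : List (List (String × Int))) (m : Int) :
    ∀ (S : List (Int × Int × Int)) (fuel : Nat) (ms : List (Int × Int × Int)) (gu au : PySem.Set Int),
    (pvSo gt algo m).filter (pvAdm gu au) = S.filter (pvAdm gu au) →
    pvFree gt gu ≤ fuel →
    S.foldl pvA_step (ms, gu, au) = pvB_loop gt algo m fuel (ms, gu, au) := by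
  intro S
  induction S with
  | nil =>
    intro fuel ms gu au hfil hfuel
    have hb : pvB_best gt algo m gu au = none := by
      rw [pv_best_char, hfil]
      rfl
    cases fuel with
    | zero => rfl
    | succ f => simp [pvB_loop, hb]
  | cons c T ih =>
    intro fuel ms gu au hfil hfuel
    by_cases hadm : pvAdm gu au c = true
    · have hfilc : (pvSo gt algo m).filter (pvAdm gu au) = c :: T.filter (pvAdm gu au) := by
        rw [hfil, List.filter_cons_of_pos hadm]
      have hcS : c ∈ pvSo gt algo m := by
        have : c ∈ (pvSo gt algo m).filter (pvAdm gu au) := by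
          rw [hfilc]; exact List.mem_cons_self
        exact List.mem_of_mem_filter this
      have hcC : c ∈ pvC gt algo m := (PySem.List.mem_sorted _ _ _ _).mp hcS
      obtain ⟨hgi0, hgilen⟩ := pv_mem_C_gi gt algo m c hcC
      have hadm' := hadm
      unfold pvAdm at hadm'
      rw [Bool.and_eq_true, Bool.not_eq_true', Bool.not_eq_true'] at hadm'
      have hgifree : PySem.Set.contains gu c.2.1 = false := hadm'.1
      have hfree1 : 1 ≤ pvFree gt gu := by
        unfold pvFree
        have hm : c.2.1 ∈ (PySem.List.pyRange 0 (gt.length : Int) 1).filter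
            (fun i => !(PySem.Set.contains gu i)) :=
          List.mem_filter.mpr ⟨PySem.List.mem_pyRange_one.mpr ⟨hgi0, hgilen⟩, by rw [hgifree]; rfl⟩
        exact List.length_pos_of_mem hm
      cases fuel with
      | zero => omega
      | succ f =>
        have hb : pvB_best gt algo m gu au = some c := by
          rw [pv_best_char, hfilc]
          rfl
        rw [List.foldl_cons]
        have hstep : pvA_step (ms, gu, au) c
            = (ms ++ [(c.2.1, c.2.2, c.1)], PySem.Set.add gu c.2.1, PySem.Set.add au c.2.2) := by
          unfold pvA_step
          rw [show (!(PySem.Set.contains (ms, gu, au).2.1 c.2.1) && !(PySem.Set.contains (ms, gu, au).2.2 c.2.2)) = pvAdm gu au c from rfl, hadm]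
          rfl
        rw [hstep]
        have hloop : pvB_loop gt algo m (f + 1) (ms, gu, au)
            = pvB_loop gt algo m f (ms ++ [(c.2.1, c.2.2, c.1)], PySem.Set.add gu c.2.1, PySem.Set.add au c.2.2) := by
          show (match pvB_best gt algo m gu au with
            | none => (ms, gu, au)
            | some d => pvB_loop gt algo m f (ms ++ [(d.2.1, d.2.2, d.1)], PySem.Set.add gu d.2.1, PySem.Set.add au d.2.2)) = _
          rw [hb]
        rw [hloop]
        apply ih
        · have hsub : ∀ (l : List (Int × Int × Int)),
              l.filter (pvAdm (PySem.Set.add gu c.2.1) (PySem.Set.add au c.2.2))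
                = (l.filter (pvAdm gu au)).filter (fun x => !(x.2.1 == c.2.1) && !(x.2.2 == c.2.2)) := by
            intro l
            rw [List.filter_filter]
            apply List.filter_congr
            intro x _
            unfold pvAdm
            rw [pv_contains_add, pv_contains_add]
            cases PySem.Set.contains gu x.2.1 <;> cases PySem.Set.contains au x.2.2 <;>
              cases x.2.1 == c.2.1 <;> cases x.2.2 == c.2.2 <;> rfl
          rw [hsub, hsub, hfilc]
          rw [List.filter_cons_of_neg (by simp)]
        · have hdec := pv_free_dec gt gu c.2.1 hgi0 hgilen hgifree
          omega
    · have hadm' : pvAdm gu au c = false := Bool.not_eq_true _ ▸ Bool.eq_false_iff.mpr hadm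
      have hstep : pvA_step (ms, gu, au) c = (ms, gu, au) := by
        unfold pvA_step
        rw [show (!(PySem.Set.contains (ms, gu, au).2.1 c.2.1) && !(PySem.Set.contains (ms, gu, au).2.2 c.2.2)) = pvAdm gu au c from rfl, hadm']
        rfl
      rw [List.foldl_cons, hstep]
      refine ih fuel ms gu au ?_ hfuel
      rw [hfil, List.filter_cons_of_neg (by rw [hadm']; simp)]


theorem pv_states_eq (gt algo : List (List (String × Int))) (m : Int) :
    (pvSo gt algo m).foldl pvA_step ([], PySem.Set.empty, PySem.Set.empty)
      = pvB_loop gt algo m gt.length ([], PySem.Set.empty, PySem.Set.empty) := by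
  apply pv_main gt algo m (pvSo gt algo m) gt.length [] PySem.Set.empty PySem.Set.empty rfl
  unfold pvFree
  have : ∀ i : Int, (!(PySem.Set.contains PySem.Set.empty i)) = true := by
    intro i; rfl
  rw [List.filter_congr (fun x _ => this x), List.filter_true]
  have := PySem.List.length_pyRange_one 0 (gt.length : Int)
  omega


theorem pv_diff_eq (n : Int) (s : PySem.Set Int) :
    PySem.Set.diff (PySem.Set.ofList (PySem.List.pyRange 0 n 1)) s
      = PySem.Set.ofList ((PySem.List.pyRange 0 n 1).filter (fun i => !(PySem.Set.contains s i))) := by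
  have hr : (PySem.List.pyRange 0 n 1).Nodup := PySem.List.nodup_pyRange_one 0 n
  unfold PySem.Set.diff
  rw [PySem.Set.ofList_eq_self_of_nodup _ hr, PySem.Set.ofList_eq_self_of_nodup _ (hr.filter _)]


theorem pv_A_closed (gt algo : List (List (String × Int))) (m : Int) :
    match_reaches gt algo m =
      (((PySem.List.sorted (pvA_cands gt algo m) pvKey false).foldl pvA_step ([], PySem.Set.empty, PySem.Set.empty)).1,
       PySem.Set.diff (PySem.Set.ofList (PySem.List.pyRange 0 gt.length 1)) ((PySem.List.sorted (pvA_cands gt algo m) pvKey false).foldl pvA_step ([], PySem.Set.empty, PySem.Set.empty)).2.1,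
       PySem.Set.diff (PySem.Set.ofList (PySem.List.pyRange 0 algo.length 1)) ((PySem.List.sorted (pvA_cands gt algo m) pvKey false).foldl pvA_step ([], PySem.Set.empty, PySem.Set.empty)).2.2) := rfl

theorem pv_B_closed (gt algo : List (List (String × Int))) (m : Int) :
    match_reaches_alt gt algo m =
      ((pvB_loop gt algo m gt.length ([], PySem.Set.empty, PySem.Set.empty)).1,
       PySem.Set.ofList ((PySem.List.pyRange 0 gt.length 1).filter (fun i => !(PySem.Set.contains (pvB_loop gt algo m gt.length ([], PySem.Set.empty, PySem.Set.empty)).2.1 i))),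
       PySem.Set.ofList ((PySem.List.pyRange 0 algo.length 1).filter (fun i => !(PySem.Set.contains (pvB_loop gt algo m gt.length ([], PySem.Set.empty, PySem.Set.empty)).2.2 i)))) := rfl

-- ===== VERDICT (by name: the statement is the Claim_ definition above) =====
theorem match_reaches_spec : Claim_equal_match_reaches := by
  intro gt algo m _ _
  unfold Spec_match_reaches
  rw [pv_A_closed, pv_B_closed, pv_candA_eq]
  rw [show PySem.List.sorted (pvC gt algo m) pvKey false = pvSo gt algo m from rfl]
  rw [pv_states_eq gt algo m, pv_diff_eq, pv_diff_eq]
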